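-- pv_equiv track=rewrite | github.com/Kabegami/ri_image_python | src/ranking.py | fusionList
-- ===== SOURCE A (Python) =====
-- def fusionList(l1 ,l2, indices):
--     if len(l2) != len(indices):
--         raise ValueError("l2 must be the same size than pos")
--     res = l1.copy()
--     for i in range(len(l2)):
--         dec = 0
--         for j in range(i):
--             if indices[j] < indices[i]:
--                 dec += 1
--         res.insert(int(indices[i] + dec), l2[i])
--     return res
-- ===== SOURCE B (Python) =====
-- def _lower_bound(a, x):
--     # first position in sorted list a whose element is >= x (hand-written binary search)
--     lo, hi = 0, len(a)
--     while lo < hi: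
--         mid = (lo + hi) // 2
--         if a[mid] < x:
--             lo = mid + 1
--         else:
--             hi = mid
--     return lo
--
--
-- def fusionList(l1, l2, indices):
--     if len(l2) != len(indices):
--         raise ValueError("l2 must be the same size than pos")
--     res = list(l1)
--     seen = []  # the indices processed so far, kept sorted
--     for x, v in zip(indices, l2):
--         k = _lower_bound(seen, x)  # how many earlier indices are < x, via binary search
--         res.insert(x + k, v)
--         seen = seen[:k] + [x] + seen[k:]
--     return res
-- ===== Notes on version B (the rewrite author's own statement) =====
-- stated objective: faster
-- what changed: The quadratic inner scan that recounts earlier smaller indices for every element is replaced by a maintained sorted list of the already-processed indices queried with a hand-written binary search (lower bound), so each shift 'dec' is found in O(log n) comparisons instead of an O(n) Python-level loop.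
import Mathlib
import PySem

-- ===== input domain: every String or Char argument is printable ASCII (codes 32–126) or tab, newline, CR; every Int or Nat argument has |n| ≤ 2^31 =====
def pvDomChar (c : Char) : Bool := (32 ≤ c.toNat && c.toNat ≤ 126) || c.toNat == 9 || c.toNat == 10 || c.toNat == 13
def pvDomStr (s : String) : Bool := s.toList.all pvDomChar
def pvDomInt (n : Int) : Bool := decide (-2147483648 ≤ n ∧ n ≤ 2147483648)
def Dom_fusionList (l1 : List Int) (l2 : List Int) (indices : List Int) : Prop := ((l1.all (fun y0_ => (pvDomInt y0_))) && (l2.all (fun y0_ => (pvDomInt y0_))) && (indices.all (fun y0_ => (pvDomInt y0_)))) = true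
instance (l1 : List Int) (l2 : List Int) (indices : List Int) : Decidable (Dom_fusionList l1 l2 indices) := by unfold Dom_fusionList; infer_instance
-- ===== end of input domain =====

-- B replaces A's inner rescan of all earlier indices by a maintained sorted list of the
-- processed indices queried with a hand-written binary search; return values proved equal.

-- ===== PORT A =====
-- literal port of A: res starts as a copy of l1; for each i an inner loop recounts the j < i with
-- indices[j] < indices[i] into dec, then res.insert(indices[i]+dec, l2[i]).
-- indices[j]/indices[i]/l2[i] are in range under Pre_ (lengths equal), so getD is exact there.
def fusionList (l1 : List Int) (l2 : List Int) (indices : List Int) : List Int :=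
  if l2.length ≠ indices.length then []   -- Python raises ValueError here; excluded by Pre_
  else
    (List.range l2.length).foldl (fun res i =>
      let dec : Int := (List.range i).foldl
        (fun dec j => if indices.getD j 0 < indices.getD i 0 then dec + 1 else dec) 0
      PySem.List.insert res (indices.getD i 0 + dec) (l2.getD i 0)) l1

-- ===== PORT B =====
-- port of Source B's hand-written _lower_bound while-loop; a[mid] is in range at every call site
-- (lo ≤ mid < hi ≤ len a), so getD is exact there; (lo+hi)//2 on Nats is Nat division.
def lowerBound (a : List Int) (x : Int) (lo hi : Nat) : Nat :=
  if h : lo < hi then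
    let mid := (lo + hi) / 2
    if a.getD mid 0 < x then lowerBound a x (mid + 1) hi else lowerBound a x lo mid
  else lo
termination_by hi - lo
decreasing_by all_goals omega

-- Source B's loop body: k = _lower_bound(seen, x); res.insert(x+k, v); seen = seen[:k]+[x]+seen[k:]
def fuseStep (st : List Int × List Int) (p : Int × Int) : List Int × List Int :=
  let k := lowerBound st.2 p.1 0 st.2.length
  (PySem.List.insert st.1 (p.1 + (k : Int)) p.2,
   st.2.take k ++ p.1 :: st.2.drop k)

-- literal port of B: fold over zip(indices, l2) carrying the pair (res, seen)
def fusionList_alt (l1 : List Int) (l2 : List Int) (indices : List Int) : List Int :=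
  if l2.length ≠ indices.length then []   -- Python raises ValueError here; excluded by Pre_
  else ((indices.zip l2).foldl fuseStep (l1, [])).1

-- ===== PRECONDITION & SPEC =====
-- A raises ValueError iff len(l2) != len(indices); exactly those inputs are excluded.
def Pre_fusionList (l1 : List Int) (l2 : List Int) (indices : List Int) : Prop :=
  l2.length = indices.length
instance (l1 : List Int) (l2 : List Int) (indices : List Int) : Decidable (Pre_fusionList l1 l2 indices) := by unfold Pre_fusionList; infer_instance

def pvWitness_fusionList : List Int × List Int × List Int := ([1, 2, 3], [7, 8], [0, 2])

def Spec_fusionList (l1 : List Int) (l2 : List Int) (indices : List Int) (out : List Int) : Prop := out = fusionList_alt l1 l2 indices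
instance (l1 : List Int) (l2 : List Int) (indices : List Int) (out : List Int) : Decidable (Spec_fusionList l1 l2 indices out) := by unfold Spec_fusionList; infer_instance

-- ===== CLAIM (what is proved, stated in full; the proofs are below) =====
def Claim_equal_fusionList : Prop := ∀ (l1 : List Int) (l2 : List Int) (indices : List Int), Dom_fusionList l1 l2 indices → Pre_fusionList l1 l2 indices → Spec_fusionList l1 l2 indices (fusionList l1 l2 indices)

-- ===== LEMMAS AND PROOFS =====

-- the binary search returns the cut point of (· < x) in a sorted list
theorem lowerBound_cut (a : List Int) (x : Int) :
    ∀ n lo hi, hi - lo = n → hi ≤ a.length → lo ≤ hi →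
    a.Pairwise (· ≤ ·) →
    (∀ j, j < lo → a.getD j 0 < x) →
    (∀ j, hi ≤ j → j < a.length → x ≤ a.getD j 0) →
    lowerBound a x lo hi ≤ a.length ∧
      ∀ j, j < a.length → (a.getD j 0 < x ↔ j < lowerBound a x lo hi) := by
  intro n
  induction n using Nat.strong_induction_on with
  | _ n IH =>
    intro lo hi hn hhi hle hsort hbelow habove
    rw [lowerBound]
    by_cases h : lo < hi
    · simp only [dif_pos h]
      have hpw := (List.pairwise_iff_getElem).1 hsort
      have hmid1 : lo ≤ (lo + hi) / 2 := by omega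
      have hmid2 : (lo + hi) / 2 < hi := by omega
      have hmlen : (lo + hi) / 2 < a.length := by omega
      by_cases hm : a.getD ((lo + hi) / 2) 0 < x
      · simp only [if_pos hm]
        refine IH (hi - ((lo + hi) / 2 + 1)) (by omega) _ _ rfl hhi (by omega) hsort ?_ habove
        intro j hj
        have hjlen : j < a.length := by omega
        rw [List.getD_eq_getElem a 0 hjlen]
        rcases Nat.lt_or_ge j ((lo + hi) / 2) with hj2 | hj2
        · have := hpw j ((lo + hi) / 2) hjlen hmlen hj2
          have hm' : a[(lo + hi) / 2] < x := by rwa [List.getD_eq_getElem a 0 hmlen] at hm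
          omega
        · have hje : j = (lo + hi) / 2 := by omega
          subst hje
          rwa [List.getD_eq_getElem a 0 hjlen] at hm
      · simp only [if_neg hm]
        refine IH ((lo + hi) / 2 - lo) (by omega) _ _ rfl (by omega) (by omega) hsort hbelow ?_
        intro j hj hjlen
        rw [List.getD_eq_getElem a 0 hjlen]
        have hxm : x ≤ a[(lo + hi) / 2] := by
          rw [List.getD_eq_getElem a 0 hmlen] at hm; omega
        rcases Nat.lt_or_ge ((lo + hi) / 2) j with hj2 | hj2
        · have := hpw ((lo + hi) / 2) j hmlen hjlen hj2
          omega
        · have : j = (lo + hi) / 2 := by omega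
          subst this; exact hxm
    · simp only [dif_neg h]
      have hlh : lo = hi := by omega
      constructor
      · omega
      · intro j hjlen
        constructor
        · intro hjx
          by_contra hjo
          have := habove j (by omega) hjlen
          omega
        · intro hjo; exact hbelow j hjo

-- a cut point of (· < x) is the countP of (· < x)
theorem countP_of_cut (a : List Int) (x : Int) :
    ∀ r, r ≤ a.length → (∀ j, j < a.length → (a.getD j 0 < x ↔ j < r)) →
    a.countP (fun y => decide (y < x)) = r := by
  induction a with
  | nil => intro r hr _; simp at hr ⊢; omega
  | cons y t IH =>
    intro r hr hc
    rw [List.countP_cons]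
    match r with
    | 0 =>
      have h0 : ¬ y < x := by
        have := (hc 0 (by simp)).1
        simpa using fun h => this h
      rw [IH 0 (by omega) ?_]
      · simp [h0]
      · intro j hj
        have := hc (j + 1) (by simpa using hj)
        simp [List.getD] at this ⊢
        omega
    | r + 1 =>
      have h0 : y < x := by
        have := (hc 0 (by simp)).2 (by omega)
        simpa using this
      rw [IH r (by simpa using hr) ?_]
      · simp [h0]
      · intro j hj
        have := hc (j + 1) (by simpa using hj)
        simp [List.getD] at this ⊢
        omega

-- A's inner loop is a countP over the processed prefix of indices
theorem innerLoop_eq_countP (ind : List Int) (x : Int) :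
    ∀ i, i ≤ ind.length →
    (List.range i).foldl (fun d j => if ind.getD j 0 < x then d + 1 else d) (0 : Int)
      = ((ind.take i).countP (fun y => decide (y < x)) : Int) := by
  intro i
  induction i with
  | zero => simp
  | succ i IH =>
    intro hi
    rw [List.range_succ, List.foldl_append, IH (by omega)]
    have hlt : i < ind.length := by omega
    rw [List.take_add_one, List.countP_append]
    simp [List.getElem?_eq_getElem hlt]
    by_cases h : ind[i] < x <;> simp [h]

-- the two folds agree step for step; seen stays a sorted permutation of the processed indices
theorem main_invariant (l1 l2 indices : List Int) (h : l2.length = indices.length) :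
    ∀ t, t ≤ l2.length →
    (((indices.zip l2).take t).foldl fuseStep (l1, [])).1
      = (List.range t).foldl (fun res i =>
          let dec : Int := (List.range i).foldl
            (fun dec j => if indices.getD j 0 < indices.getD i 0 then dec + 1 else dec) 0
          PySem.List.insert res (indices.getD i 0 + dec) (l2.getD i 0)) l1
    ∧ (((indices.zip l2).take t).foldl fuseStep (l1, [])).2.Pairwise (· ≤ ·)
    ∧ (((indices.zip l2).take t).foldl fuseStep (l1, [])).2.Perm (indices.take t) := by
  intro t
  induction t with
  | zero => simp
  | succ t IH =>
    intro ht
    obtain ⟨ih1, ih2, ih3⟩ := IH (by omega)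
    have htl2 : t < l2.length := by omega
    have htind : t < indices.length := by omega
    have hzlen : (indices.zip l2).length = l2.length := by
      rw [List.length_zip]; omega
    have hzt : (indices.zip l2).take (t + 1)
        = (indices.zip l2).take t ++ [(indices[t], l2[t])] := by
      rw [List.take_add_one, List.getElem?_eq_getElem (by omega)]
      simp [List.getElem_zip]
    set B := (((indices.zip l2).take t).foldl fuseStep (l1, [])) with hB
    have hfold : (((indices.zip l2).take (t + 1)).foldl fuseStep (l1, []))
        = fuseStep B (indices[t], l2[t]) := by
      rw [hzt, List.foldl_append]; simp; rw [← hB]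
    set x := indices[t] with hx
    set k := lowerBound B.2 x 0 B.2.length with hk
    have hcut := lowerBound_cut B.2 x (B.2.length - 0) 0 B.2.length rfl le_rfl
      (by omega) ih2 (by omega) (by omega)
    have hkle : k ≤ B.2.length := hcut.1
    have hchar := hcut.2
    rw [← hk] at hchar
    have hcount : B.2.countP (fun y => decide (y < x)) = k :=
      countP_of_cut B.2 x k hkle hchar
    have hdec : (List.range t).foldl
        (fun dec j => if indices.getD j 0 < indices.getD t 0 then dec + 1 else dec) (0 : Int)
        = (k : Int) := by
      rw [List.getD_eq_getElem indices 0 htind, ← hx,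
          innerLoop_eq_countP indices x t (by omega),
          ← ih3.countP_eq (fun y => decide (y < x)), hcount]
    refine ⟨?_, ?_, ?_⟩
    · rw [hfold, List.range_succ, List.foldl_append]
      simp only [List.foldl_cons, List.foldl_nil, fuseStep]
      rw [hdec, ih1, List.getD_eq_getElem indices 0 htind,
          List.getD_eq_getElem l2 0 htl2]
    · rw [hfold]
      simp only [fuseStep, ← hk]
      rw [List.pairwise_append]
      refine ⟨ih2.sublist (List.take_sublist _ _), ?_, ?_⟩
      · rw [List.pairwise_cons]
        refine ⟨?_, ih2.sublist (List.drop_sublist _ _)⟩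
        intro y hy
        obtain ⟨j, hj, hjy⟩ := List.mem_iff_getElem.1 hy
        rw [List.getElem_drop] at hjy
        have hlen : k + j < B.2.length := by
          have := List.length_drop (l := B.2) (i := k); omega
        have hiff := hchar (k + j) hlen
        rw [List.getD_eq_getElem B.2 0 hlen] at hiff
        subst hjy
        omega
      · intro y hy b hb
        obtain ⟨j, hj, hjy⟩ := List.mem_iff_getElem.1 hy
        rw [List.getElem_take] at hjy
        have hjlt : j < k := by
          have := List.length_take (i := k) (l := B.2); omega
        have hylt : y < x := by
          have hiff := hchar j (by omega)
          rw [List.getD_eq_getElem B.2 0 (by omega)] at hiff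
          omega
        rcases List.mem_cons.1 hb with hbx | hbd
        · omega
        · obtain ⟨j2, hj2, hj2b⟩ := List.mem_iff_getElem.1 hbd
          rw [List.getElem_drop] at hj2b
          have hlen2 : k + j2 < B.2.length := by
            have := List.length_drop (l := B.2) (i := k); omega
          have hiff2 := hchar (k + j2) hlen2
          rw [List.getD_eq_getElem B.2 0 hlen2] at hiff2
          subst hj2b
          omega
    · rw [hfold]
      simp only [fuseStep, ← hk]
      have h1 : (B.2.take k ++ x :: B.2.drop k).Perm (x :: B.2) := by
        have := List.perm_middle (a := x) (l₁ := B.2.take k) (l₂ := B.2.drop k)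
        simpa [List.take_append_drop] using this
      refine h1.trans ?_
      have h2 : (x :: indices.take t).Perm (indices.take t ++ [x]) := by
        simpa using (List.perm_middle (a := x) (l₁ := indices.take t) (l₂ := [])).symm
      have h3 : indices.take (t + 1) = indices.take t ++ [x] := by
        rw [List.take_add_one, List.getElem?_eq_getElem htind]; simp [hx]
      rw [h3]
      exact (ih3.cons x).trans h2

-- ===== VERDICT (by name: the statement is the Claim_ definition above) =====
theorem fusionList_spec : Claim_equal_fusionList := by
  intro l1 l2 indices _ hpre
  unfold Spec_fusionList fusionList fusionList_alt
  unfold Pre_fusionList at hpre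
  rw [if_neg (by omega), if_neg (by omega)]
  have h := (main_invariant l1 l2 indices hpre l2.length le_rfl).1
  rw [← h]
  congr 1
  rw [List.take_of_length_le]
  simp [List.length_zip, hpre]
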